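-- pv_equiv track=rewrite | github.com/J0ey1iu/minimal-harness | src/minimal_harness/client/built_in/app.py | _get_default_agent
-- ===== SOURCE A (Python) =====
-- from typing import Any
--
-- def _get_default_agent(
--     agents: list[dict[str, Any]],
--     default_name: str = "general_assistant",
-- ) -> dict[str, Any] | None:
--     for a in agents:
--         if a.get("name") == default_name:
--             return a
--     for a in agents:
--         if a.get("name") == "general_assistant":
--             return a
--     return agents[0] if agents else None
-- ===== SOURCE B (Python) =====
-- def _get_default_agent(agents, default_name="general_assistant"):
--     ga = None
--     first = None
--     for a in agents:
--         if first is None: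
--             first = a
--         n = a.get("name")
--         if n == default_name:
--             return a
--         if ga is None and n == "general_assistant":
--             ga = a
--     return ga if ga is not None else first
-- ===== Notes on version B (the rewrite author's own statement) =====
-- stated objective: alternative
-- what changed: Replaces A's two sequential full scans plus an indexed fallback with a single pass that returns on a preferred-name match while tracking the first 'general_assistant' agent and the first agent as fallbacks.
import Mathlib
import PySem

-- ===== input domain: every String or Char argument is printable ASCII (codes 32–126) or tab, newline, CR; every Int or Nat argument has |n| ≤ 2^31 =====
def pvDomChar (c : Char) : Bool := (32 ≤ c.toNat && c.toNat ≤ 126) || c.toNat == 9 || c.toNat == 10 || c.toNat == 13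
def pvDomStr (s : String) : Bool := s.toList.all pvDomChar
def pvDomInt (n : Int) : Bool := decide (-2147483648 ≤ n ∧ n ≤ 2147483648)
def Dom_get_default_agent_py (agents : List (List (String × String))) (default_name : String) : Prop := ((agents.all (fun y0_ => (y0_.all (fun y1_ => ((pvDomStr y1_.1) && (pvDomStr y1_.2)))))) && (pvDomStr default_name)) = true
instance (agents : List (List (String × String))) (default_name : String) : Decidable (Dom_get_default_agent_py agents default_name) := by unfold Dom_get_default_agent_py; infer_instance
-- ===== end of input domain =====

-- B replaces A's two sequential scans with a single pass tracking fallback candidates; same O(n) cost, different decomposition.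


-- ===== PORT A =====
def pvFindByName : List (List (String × String)) → String → Option (List (String × String))
  | [], _ => none
  | a :: rest, nm =>
    if (PySem.Dict.mk a).get? "name" = some nm then some a else pvFindByName rest nm

def get_default_agent_py (agents : List (List (String × String))) (default_name : String) : Option (List (String × String)) :=
  match pvFindByName agents default_name with
  | some a => some a
  | none =>
    match pvFindByName agents "general_assistant" with
    | some a => some a
    | none => match agents with | [] => none | a :: _ => some a

-- ===== PORT B =====
def pvOnePass : List (List (String × String)) → String → Option (List (String × String)) → Option (List (String × String)) → Option (List (String × String))
  | [], _, ga, first => match ga with | some g => some g | none => first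
  | a :: rest, nm, ga, first =>
    let first' := match first with | some f => some f | none => some a
    let n := (PySem.Dict.mk a).get? "name"
    if n = some nm then some a
    else pvOnePass rest nm (match ga with | some g => some g | none => if n = some "general_assistant" then some a else none) first'

def get_default_agent_py_alt (agents : List (List (String × String))) (default_name : String) : Option (List (String × String)) :=
  pvOnePass agents default_name none none

-- ===== PRECONDITION & SPEC =====
def Spec_get_default_agent_py (agents : List (List (String × String))) (default_name : String) (out : Option (List (String × String))) : Prop := out = get_default_agent_py_alt agents default_name
instance (agents : List (List (String × String))) (default_name : String) (out : Option (List (String × String))) : Decidable (Spec_get_default_agent_py agents default_name out) := by unfold Spec_get_default_agent_py; infer_instance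

-- ===== CLAIM (what is proved, stated in full; the proofs are below) =====
def Claim_equal_get_default_agent_py : Prop := ∀ (agents : List (List (String × String))) (default_name : String), Dom_get_default_agent_py agents default_name → Spec_get_default_agent_py agents default_name (get_default_agent_py agents default_name)

-- ===== LEMMAS AND PROOFS =====


theorem pvOnePass_eq (agents : List (List (String × String))) (nm : String)
    (ga first : Option (List (String × String))) :
    pvOnePass agents nm ga first =
      match pvFindByName agents nm with
      | some a => some a
      | none =>
        match ga with
        | some g => some g
        | none =>
          match pvFindByName agents "general_assistant" with
          | some a => some a
          | none =>
            match first with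
            | some f => some f
            | none => match agents with | [] => none | a :: _ => some a := by
  induction agents generalizing ga first with
  | nil => cases ga <;> cases first <;> simp [pvOnePass, pvFindByName]
  | cons a rest ih =>
    by_cases h1 : (PySem.Dict.mk a).get? "name" = some nm <;>
      by_cases h2 : (PySem.Dict.mk a).get? "name" = some "general_assistant" <;>
        cases ga <;> cases first <;>
          simp [pvOnePass, pvFindByName, h1, h2, ih] <;>
            (try (cases pvFindByName rest nm <;> simp)) <;>
              (have hne : "general_assistant" ≠ nm := fun h => h1 (h ▸ h2); simp [hne])

-- ===== VERDICT (by name: the statement is the Claim_ definition above) =====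
theorem get_default_agent_py_spec : Claim_equal_get_default_agent_py := by
  intro agents default_name _
  unfold Spec_get_default_agent_py get_default_agent_py get_default_agent_py_alt
  rw [pvOnePass_eq]
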